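-- pv_equiv track=rewrite | github.com/kay-mw/advent-of-code | 2/p2.py | identify_safe
-- ===== SOURCE A (Python) =====
-- def identify_safe(
--     inputlines: list[list[int]],
-- ) -> tuple[list[list[int]], list[list[int]], int]:
--     safe_li = []
--     unsafe_li = []
--     safe_count = 0
--     for input in inputlines:
--         safe = True
--         increasing = True if sorted(input) == input else False
--         decreasing = True if sorted(input, reverse=True) == input else False
--         if len(set(input)) != len(input):
--             increasing, decreasing = False, False
--
--         if not increasing and not decreasing:
--             safe = False
--         else:
--             for i in range(1, len(input)):
--                 diff = input[i] - input[i - 1]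
--                 if abs(diff) > 3:
--                     safe = False
--                     break
--
--         safe_li.append(input) if safe else unsafe_li.append(input)
--         if safe:
--             safe_count += 1
--
--     return safe_li, unsafe_li, safe_count
-- ===== SOURCE B (Python) =====
-- def identify_safe(
--     inputlines: list[list[int]],
-- ) -> tuple[list[list[int]], list[list[int]], int]:
--     safe_li = []
--     unsafe_li = []
--     for input in inputlines:
--         diffs = [b - a for a, b in zip(input, input[1:])]
--         safe = all(1 <= d <= 3 for d in diffs) or all(-3 <= d <= -1 for d in diffs)
--         (safe_li if safe else unsafe_li).append(input)
--     return safe_li, unsafe_li, len(safe_li)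
-- ===== Notes on version B (the rewrite author's own statement) =====
-- stated objective: alternative
-- what changed: Per line, A sorts the list twice and builds a set to test monotonicity/distinctness and then rescans adjacent diffs; B drops all of that and decides safety in one pass over the adjacent differences, checking they all lie in [1,3] or all in [-3,-1].
import Mathlib
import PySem

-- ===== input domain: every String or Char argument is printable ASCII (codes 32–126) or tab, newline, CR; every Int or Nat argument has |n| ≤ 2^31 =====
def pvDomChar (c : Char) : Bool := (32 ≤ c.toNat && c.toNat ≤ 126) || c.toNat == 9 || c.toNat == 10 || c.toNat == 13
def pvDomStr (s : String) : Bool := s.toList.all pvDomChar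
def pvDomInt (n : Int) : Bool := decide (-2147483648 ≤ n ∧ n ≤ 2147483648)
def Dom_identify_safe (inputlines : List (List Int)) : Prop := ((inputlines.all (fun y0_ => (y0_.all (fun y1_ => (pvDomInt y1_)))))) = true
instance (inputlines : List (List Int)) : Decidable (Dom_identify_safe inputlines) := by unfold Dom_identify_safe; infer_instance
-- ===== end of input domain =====

-- B replaces A's per-line double sort + set-dedup test with one linear scan of adjacent
-- differences (each in [1,3] or each in [-3,-1]); same results on every input.


-- ===== PORT A =====
-- A's inner 'for i in range(1, len(input))' with break; the indices are always in
-- range, so input[i] is ported as pyGetD (exact here)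
def identifySafeDiffLoop (input : List Int) : List Int → Bool
  | [] => true
  | i :: rest =>
    let diff := PySem.List.pyGetD input i 0 - PySem.List.pyGetD input (i - 1) 0
    if 3 < |diff| then false
    else identifySafeDiffLoop input rest

-- the body of A's outer loop, deciding 'safe' for one line
def identifySafeLine (input : List Int) : Bool :=
  let increasing := PySem.List.sorted input (fun x => x) false == input
  let decreasing := PySem.List.sorted input (fun x => x) true == input
  let p := if PySem.Set.len (PySem.Set.ofList input) ≠ PySem.List.len input
           then (false, false) else (increasing, decreasing)
  if !p.1 && !p.2 then false
  else identifySafeDiffLoop input (PySem.List.pyRange 1 (PySem.List.len input) 1)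

def identify_safe (inputlines : List (List Int)) : List (List Int) × List (List Int) × Int :=
  inputlines.foldl
    (fun (acc : List (List Int) × List (List Int) × Int) input =>
      if identifySafeLine input then (acc.1 ++ [input], acc.2.1, acc.2.2 + 1)
      else (acc.1, acc.2.1 ++ [input], acc.2.2))
    ([], [], 0)

-- ===== PORT B =====
-- B's per-line test: adjacent differences all in [1,3] or all in [-3,-1]
def altSafeLine (input : List Int) : Bool :=
  let diffs := (input.zip (input.drop 1)).map (fun p => p.2 - p.1)
  diffs.all (fun d => decide (1 ≤ d) && decide (d ≤ 3)) ||
    diffs.all (fun d => decide (-3 ≤ d) && decide (d ≤ -1))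

def identify_safe_alt (inputlines : List (List Int)) : List (List Int) × List (List Int) × Int :=
  let p := inputlines.foldl
    (fun (acc : List (List Int) × List (List Int)) input =>
      if altSafeLine input then (acc.1 ++ [input], acc.2)
      else (acc.1, acc.2 ++ [input]))
    ([], [])
  (p.1, p.2, (p.1.length : Int))

-- ===== PRECONDITION & SPEC =====
def Spec_identify_safe (inputlines : List (List Int)) (out : List (List Int) × List (List Int) × Int) : Prop := out = identify_safe_alt inputlines
instance (inputlines : List (List Int)) (out : List (List Int) × List (List Int) × Int) : Decidable (Spec_identify_safe inputlines out) := by unfold Spec_identify_safe; infer_instance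

-- ===== CLAIM (what is proved, stated in full; the proofs are below) =====
def Claim_equal_identify_safe : Prop := ∀ (inputlines : List (List Int)), Dom_identify_safe inputlines → Spec_identify_safe inputlines (identify_safe inputlines)

-- ===== LEMMAS AND PROOFS =====

-- A's set-size test is exactly distinctness
lemma setLen_eq_iff_nodup (xs : List Int) :
    PySem.Set.len (PySem.Set.ofList xs) = PySem.List.len xs ↔ xs.Nodup := by
  have hfin : (PySem.Set.ofList xs).toFinset = xs.toFinset := by
    ext a; simp [PySem.Set.mem_ofList]
  have hlen : (PySem.Set.ofList xs).length = xs.dedup.length := by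
    rw [← List.toFinset_card_of_nodup (PySem.Set.nodup_ofList xs), hfin, List.card_toFinset]
  constructor
  · intro h
    have : xs.dedup.length = xs.length := by
      simp [PySem.Set.len, PySem.List.len, hlen] at h
      omega
    exact List.dedup_eq_self.mp ((List.dedup_sublist xs).eq_of_length this)
  · intro h
    simp [PySem.Set.len, PySem.List.len, PySem.Set.ofList_eq_self_of_nodup xs h]

-- sorted(xs) == xs is exactly Pairwise (≤)
lemma sorted_beq_iff (xs : List Int) :
    (PySem.List.sorted xs (fun x => x) false == xs) = true ↔ xs.Pairwise (· ≤ ·) := by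
  rw [beq_iff_eq]
  constructor
  · intro h; have := PySem.List.sorted_pairwise xs (fun x => x); rwa [h] at this
  · exact fun h => PySem.List.sorted_eq_self_of_pairwise xs (fun x => x) h

-- sorted(xs, reverse=True) == xs is exactly Pairwise (≥)
lemma sorted_rev_beq_iff (xs : List Int) :
    (PySem.List.sorted xs (fun x => x) true == xs) = true ↔ xs.Pairwise (fun a b => b ≤ a) := by
  rw [beq_iff_eq]
  constructor
  · intro h; have := PySem.List.sorted_pairwise_rev xs (fun x => x); rwa [h] at this
  · exact fun h => PySem.List.sorted_rev_eq_self_of_pairwise xs (fun x => x) h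

-- A's break-loop is an all-test over the index range
lemma loop_eq_all (xs : List Int) (l : List Int) :
    identifySafeDiffLoop xs l =
      l.all (fun i => decide (|PySem.List.pyGetD xs i 0 - PySem.List.pyGetD xs (i - 1) 0| ≤ 3)) := by
  induction l with
  | nil => rfl
  | cons i rest ih =>
    simp only [identifySafeDiffLoop, List.all_cons, ih]
    split_ifs with h
    · simp; omega
    · simp; omega

-- A's break-loop over range(1, len) is the adjacent |diff| ≤ 3 chain
lemma diffLoop_iff (xs : List Int) :
    identifySafeDiffLoop xs (PySem.List.pyRange 1 ((xs.length : Int)) 1) = true ↔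
      xs.IsChain (fun a b => -3 ≤ b - a ∧ b - a ≤ 3) := by
  rw [loop_eq_all, List.all_eq_true, List.isChain_iff_getElem]
  constructor
  · intro h i hi
    have h1 := h ((i + 1 : Nat) : Int) (by
      rw [PySem.List.mem_pyRange_one]
      simp
      omega)
    rw [PySem.List.pyGetD_eq_getElem xs 0 (by omega) (by simp; omega)] at h1
    have he : ((i + 1 : Nat) : Int) - 1 = ((i : Nat) : Int) := by omega
    rw [he, PySem.List.pyGetD_eq_getElem xs 0 (by omega) (by simp; omega)] at h1
    rw [decide_eq_true_iff, abs_le] at h1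
    simpa using h1
  · intro h i hmem
    rw [PySem.List.mem_pyRange_one] at hmem
    obtain ⟨h1, h2⟩ := hmem
    rw [PySem.List.pyGetD_eq_getElem xs 0 (by omega) (by omega),
        PySem.List.pyGetD_eq_getElem xs 0 (by omega) (by omega)]
    have hk : (i - 1).toNat + 1 = i.toNat := by omega
    have := h (i - 1).toNat (by omega)
    simp only [hk] at this
    rw [decide_eq_true_iff, abs_le]
    exact this

-- A's per-line test, characterised
lemma lineA_iff (xs : List Int) :
    identifySafeLine xs = true ↔
      (xs.Nodup ∧ (xs.Pairwise (· ≤ ·) ∨ xs.Pairwise (fun a b => b ≤ a)) ∧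
        xs.IsChain (fun a b => -3 ≤ b - a ∧ b - a ≤ 3)) := by
  unfold identifySafeLine
  have hset := setLen_eq_iff_nodup xs
  by_cases hnd : xs.Nodup
  · have h2 : (PySem.Set.ofList xs).length = xs.length := by
      have := hset.mpr hnd
      simpa [PySem.Set.len, PySem.List.len] using this
    cases hb1 : (PySem.List.sorted xs (fun x => x) false == xs) <;>
      cases hb2 : (PySem.List.sorted xs (fun x => x) true == xs) <;>
      simp [h2, diffLoop_iff, hnd, ← sorted_beq_iff, ← sorted_rev_beq_iff, hb1, hb2]
  · have h2 : ¬((PySem.Set.ofList xs).length = xs.length) := by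
      intro h
      exact hnd (hset.mp (by simpa [PySem.Set.len, PySem.List.len] using h))
    simp [h2, hnd]

-- B's zip-of-diffs all-test is the corresponding chain
lemma zipAll_iff (xs : List Int) (p : Int → Bool) :
    ((xs.zip (xs.drop 1)).map (fun q => q.2 - q.1)).all p = true ↔
      xs.IsChain (fun a b => p (b - a) = true) := by
  induction xs with
  | nil => simp
  | cons x t ih =>
    cases t with
    | nil => simp
    | cons y t' =>
      simp only [List.drop_succ_cons, List.drop_zero, List.zip_cons_cons, List.map_cons,
        List.all_cons, Bool.and_eq_true, List.isChain_cons_cons] at *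
      rw [← ih]

-- B's per-line test, characterised
lemma lineB_iff (xs : List Int) :
    altSafeLine xs = true ↔
      (xs.IsChain (fun a b => 1 ≤ b - a ∧ b - a ≤ 3) ∨
       xs.IsChain (fun a b => -3 ≤ b - a ∧ b - a ≤ -1)) := by
  unfold altSafeLine
  simp only [Bool.or_eq_true]
  rw [zipAll_iff, zipAll_iff]
  constructor
  · rintro (h | h)
    · exact Or.inl (h.imp (fun _ _ hp => by simpa using hp))
    · exact Or.inr (h.imp (fun _ _ hp => by simpa using hp))
  · rintro (h | h)
    · exact Or.inl (h.imp (fun _ _ hp => by simpa using hp))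
    · exact Or.inr (h.imp (fun _ _ hp => by simpa using hp))

-- the two characterisations coincide
lemma props_iff (xs : List Int) :
    (xs.Nodup ∧ (xs.Pairwise (· ≤ ·) ∨ xs.Pairwise (fun a b => b ≤ a)) ∧
      xs.IsChain (fun a b => -3 ≤ b - a ∧ b - a ≤ 3))
    ↔ (xs.IsChain (fun a b => 1 ≤ b - a ∧ b - a ≤ 3) ∨
       xs.IsChain (fun a b => -3 ≤ b - a ∧ b - a ≤ -1)) := by
  constructor
  · rintro ⟨hnd, hmono, habs⟩
    have hne := hnd.isChain
    rw [List.isChain_iff_getElem] at hne habs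
    rcases hmono with h | h
    · left
      have hle := h.isChain
      rw [List.isChain_iff_getElem] at hle
      rw [List.isChain_iff_getElem]
      intro i hi
      have := hne i hi; have := habs i hi; have := hle i hi
      omega
    · right
      have hle := h.isChain
      rw [List.isChain_iff_getElem] at hle
      rw [List.isChain_iff_getElem]
      intro i hi
      have := hne i hi; have := habs i hi; have := hle i hi
      omega
  · rintro (h | h)
    · have hlt : xs.IsChain (· < ·) := h.imp (fun _ _ hp => by omega)
      have hpw := List.isChain_iff_pairwise.mp hlt
      exact ⟨hpw.imp ne_of_lt, Or.inl (hpw.imp le_of_lt),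
        h.imp (fun _ _ hp => by omega)⟩
    · have hlt : xs.IsChain (fun a b => b < a) := h.imp (fun _ _ hp => by omega)
      have hpw := List.isChain_iff_pairwise.mp hlt
      exact ⟨hpw.imp ne_of_gt, Or.inr (hpw.imp le_of_lt),
        h.imp (fun _ _ hp => by omega)⟩

-- the per-line tests agree
lemma line_eq (xs : List Int) : identifySafeLine xs = altSafeLine xs := by
  rw [Bool.eq_iff_iff, lineA_iff, lineB_iff]
  exact props_iff xs

-- the two folds agree, with A's counter tracking the length of B's safe list
lemma fold_eq (lines : List (List Int)) (s u : List (List Int)) :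
    lines.foldl
      (fun (acc : List (List Int) × List (List Int) × Int) input =>
        if identifySafeLine input then (acc.1 ++ [input], acc.2.1, acc.2.2 + 1)
        else (acc.1, acc.2.1 ++ [input], acc.2.2))
      (s, u, (s.length : Int)) =
    (let p := lines.foldl
        (fun (acc : List (List Int) × List (List Int)) input =>
          if altSafeLine input then (acc.1 ++ [input], acc.2)
          else (acc.1, acc.2 ++ [input]))
        (s, u)
     (p.1, p.2, (p.1.length : Int))) := by
  induction lines generalizing s u with
  | nil => simp
  | cons x t ih =>
    simp only [List.foldl_cons, line_eq x]
    by_cases h : altSafeLine x = true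
    · simpa [h] using ih (s ++ [x]) u
    · simpa [h] using ih s (u ++ [x])

-- ===== VERDICT (by name: the statement is the Claim_ definition above) =====
theorem identify_safe_spec : Claim_equal_identify_safe := by
  intro inputlines _
  unfold Spec_identify_safe identify_safe identify_safe_alt
  simpa using fold_eq inputlines [] []
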